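-- pv_equiv track=rewrite | github.com/Ankit10869734/AI_LAB_materials | 6th/lab6.py | get_best_neighbour
-- ===== SOURCE A (Python) =====
-- def count_attacks(board):
--     n = len(board)
--     attacks = 0
--     for i in range(n):
--         for j in range(i + 1, n):
--             if board[i] == board[j]:
--                 attacks += 1
--             if abs(board[i] - board[j]) == abs(i - j):
--                 attacks += 1
--     return attacks
--
-- def get_best_neighbour(board):
--     n = len(board)
--     best = board[:]
--     best_attacks = count_attacks(board)
--     for row in range(n):
--         for col in range(n):
--             if col == board[row]:
--                 continue
--             neighbour = board[:]
--             neighbour[row] = col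
--             attacks = count_attacks(neighbour)
--             if attacks < best_attacks:
--                 best_attacks = attacks
--                 best = neighbour[:]
--     return best, best_attacks
-- ===== SOURCE B (Python) =====
-- def get_best_neighbour(board):
--     # Delta evaluation: one base count plus O(n) per-move conflict deltas
--     # instead of re-counting the whole board for every neighbour.
--     n = len(board)
--
--     def contrib(r, v):
--         # attacks between a queen placed at (r, v) and every other queen
--         c = 0
--         for j in range(n):
--             if j == r:
--                 continue
--             if board[j] == v:
--                 c += 1
--             if abs(board[j] - v) == abs(j - r):
--                 c += 1
--         return c
--
--     base = sum(contrib(r, board[r]) for r in range(n)) // 2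
--     best = board[:]
--     best_attacks = base
--     for row in range(n):
--         old = contrib(row, board[row])
--         for col in range(n):
--             if col == board[row]:
--                 continue
--             attacks = base - old + contrib(row, col)
--             if attacks < best_attacks:
--                 best_attacks = attacks
--                 best = board[:]
--                 best[row] = col
--     return best, best_attacks
-- ===== Notes on version B (the rewrite author's own statement) =====
-- stated objective: faster
-- what changed: Instead of copying the board and re-counting all attacking pairs for every candidate move (O(n^2) per neighbour), B counts the base attacks once and evaluates each move by an O(n) conflict delta for the moved queen (base - old row contribution + new contribution).
import Mathlib
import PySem

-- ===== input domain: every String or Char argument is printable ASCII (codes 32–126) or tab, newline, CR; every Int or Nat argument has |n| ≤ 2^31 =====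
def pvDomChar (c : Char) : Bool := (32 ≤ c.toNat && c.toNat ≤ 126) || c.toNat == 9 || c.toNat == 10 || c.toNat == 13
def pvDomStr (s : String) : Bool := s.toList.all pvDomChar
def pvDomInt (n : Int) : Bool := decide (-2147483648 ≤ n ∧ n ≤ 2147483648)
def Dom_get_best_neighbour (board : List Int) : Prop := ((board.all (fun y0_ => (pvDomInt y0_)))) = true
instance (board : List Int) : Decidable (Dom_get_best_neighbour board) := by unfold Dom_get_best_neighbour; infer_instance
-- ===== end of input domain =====

-- B replaces A's per-neighbour full O(n^2) attack recount by one base count plus an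
-- O(n) conflict delta per move (objective: faster, O(n^4) -> O(n^3)).


-- ===== PORT A =====
-- count_attacks(board): nested i < j loops, two independent increments.
-- (all indices produced by range(n) are in range, so pyGetD _ _ 0 is exact here)
def count_attacks (board : List Int) : Int :=
  let n : Int := board.length
  (PySem.List.pyRange 0 n 1).foldl (fun attacks i =>
    (PySem.List.pyRange (i + 1) n 1).foldl (fun attacks j =>
      let attacks := if PySem.List.pyGetD board i 0 = PySem.List.pyGetD board j 0
                     then attacks + 1 else attacks
      if (PySem.List.pyGetD board i 0 - PySem.List.pyGetD board j 0).natAbs = (i - j).natAbs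
      then attacks + 1 else attacks) attacks) 0

def get_best_neighbour (board : List Int) : List Int × Int :=
  let n : Int := board.length
  let best := board
  let best_attacks := count_attacks board
  (PySem.List.pyRange 0 n 1).foldl (fun s row =>
    (PySem.List.pyRange 0 n 1).foldl (fun s col =>
      if col = PySem.List.pyGetD board row 0 then s
      else
        let neighbour := PySem.List.pySetD board row col
        let attacks := count_attacks neighbour
        if attacks < s.2 then (neighbour, attacks) else s) s) (best, best_attacks)

-- ===== PORT B =====
-- contrib(r, v): attacks between a queen at (r, v) and every other queen (one O(n) pass).
def pvContrib (board : List Int) (r v : Int) : Int :=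
  (PySem.List.pyRange 0 (board.length : Int) 1).foldl (fun c j =>
    if j = r then c
    else
      let c := if PySem.List.pyGetD board j 0 = v then c + 1 else c
      if (PySem.List.pyGetD board j 0 - v).natAbs = (j - r).natAbs
      then c + 1 else c) 0

def get_best_neighbour_alt (board : List Int) : List Int × Int :=
  let n : Int := board.length
  let base := PySem.Int.floordiv
    ((PySem.List.pyRange 0 n 1).foldl
      (fun t r => t + pvContrib board r (PySem.List.pyGetD board r 0)) 0) 2
  (PySem.List.pyRange 0 n 1).foldl (fun s row =>
    let old := pvContrib board row (PySem.List.pyGetD board row 0)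
    (PySem.List.pyRange 0 n 1).foldl (fun s col =>
      if col = PySem.List.pyGetD board row 0 then s
      else
        let attacks := base - old + pvContrib board row col
        if attacks < s.2 then (PySem.List.pySetD board row col, attacks) else s) s) (board, base)

-- ===== PRECONDITION & SPEC =====
def Spec_get_best_neighbour (board : List Int) (out : List Int × Int) : Prop := out = get_best_neighbour_alt board
instance (board : List Int) (out : List Int × Int) : Decidable (Spec_get_best_neighbour board out) := by unfold Spec_get_best_neighbour; infer_instance

-- ===== CLAIM (what is proved, stated in full; the proofs are below) =====
def Claim_equal_get_best_neighbour : Prop := ∀ (board : List Int), Dom_get_best_neighbour board → Spec_get_best_neighbour board (get_best_neighbour board)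

-- ===== LEMMAS AND PROOFS =====

-- value of board at a (Nat) index, mathematical double-sum views of both counters
def pvVal (b : List Int) (k : ℕ) : Int := b.getD k 0

def pvPair (x y : Int) (i j : Int) : Int :=
  (if x = y then 1 else 0) + (if (x - y).natAbs = (i - j).natAbs then 1 else 0)

def pvT (b : List Int) (i j : ℕ) : Int := pvPair (pvVal b i) (pvVal b j) i j

def pvS (b : List Int) : Int :=
  ∑ i ∈ Finset.range b.length, ∑ j ∈ Finset.Ico (i + 1) b.length, pvT b i j

def pvC (b : List Int) (r : ℕ) (v : Int) : Int :=
  ∑ j ∈ Finset.range b.length, if j = r then 0 else pvPair (pvVal b j) v j r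

theorem pvPair_comm (x y i j : Int) : pvPair x y i j = pvPair y x j i := by
  unfold pvPair
  split_ifs <;> omega

-- foldl with the two sequential conditional increments is foldl-add of pvPair
theorem pvStep_eq (a x y i j : Int) :
    (if (x - y).natAbs = (i - j).natAbs
     then (if x = y then a + 1 else a) + 1 else (if x = y then a + 1 else a))
    = a + pvPair x y i j := by
  unfold pvPair; split_ifs <;> omega

theorem sum_Ico_split (a r n : ℕ) (ha : a ≤ r) (hr : r < n) (f : ℕ → Int) :
    ∑ j ∈ Finset.Ico a n, f j
      = (∑ j ∈ Finset.Ico a r, f j) + f r + ∑ j ∈ Finset.Ico (r + 1) n, f j := by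
  rw [← Finset.sum_Ico_consecutive f (by omega : a ≤ r + 1) (by omega : r + 1 ≤ n),
      Finset.sum_Ico_succ_top ha]

theorem sum_range_split (r n : ℕ) (hr : r < n) (f : ℕ → Int) :
    ∑ j ∈ Finset.range n, f j
      = (∑ j ∈ Finset.range r, f j) + f r + ∑ j ∈ Finset.Ico (r + 1) n, f j := by
  simp only [Finset.range_eq_Ico]
  exact sum_Ico_split 0 r n (Nat.zero_le r) hr f

theorem sum_triangle (n : ℕ) (f : ℕ → ℕ → Int) :
    ∑ r ∈ Finset.range n, ∑ i ∈ Finset.range r, f i r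
      = ∑ i ∈ Finset.range n, ∑ r ∈ Finset.Ico (i + 1) n, f i r := by
  have h := Finset.sum_Ico_Ico_comm 0 n f
  have h1 : ∀ i ∈ Finset.Ico 0 n, ∑ j ∈ Finset.Ico i n, f i j
      = f i i + ∑ j ∈ Finset.Ico (i + 1) n, f i j := by
    intro i hi
    exact Finset.sum_eq_sum_Ico_succ_bot (Finset.mem_Ico.mp hi).2 _
  have h2 : ∀ j ∈ Finset.Ico 0 n, ∑ i ∈ Finset.Ico 0 (j + 1), f i j
      = (∑ i ∈ Finset.Ico 0 j, f i j) + f j j := by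
    intro j _
    exact Finset.sum_Ico_succ_top (Nat.zero_le j) _
  rw [Finset.sum_congr rfl h1, Finset.sum_congr rfl h2] at h
  simp only [Finset.sum_add_distrib, Finset.range_eq_Ico] at h ⊢
  linarith

theorem pyRange_map_sum (a c : Int) (f : Int → Int) :
    ((PySem.List.pyRange a c 1).map f).sum = ∑ k ∈ Finset.range (c - a).toNat, f (a + (k : Int)) := by
  rw [PySem.List.pyRange_one, List.map_map]; rfl

theorem count_attacks_eq (b : List Int) : count_attacks b = pvS b := by
  have hin : ∀ (i acc : Int),
      (PySem.List.pyRange (i + 1) (b.length : Int) 1).foldl (fun attacks j =>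
        let attacks := if PySem.List.pyGetD b i 0 = PySem.List.pyGetD b j 0
                       then attacks + 1 else attacks
        if (PySem.List.pyGetD b i 0 - PySem.List.pyGetD b j 0).natAbs = (i - j).natAbs
        then attacks + 1 else attacks) acc
      = acc + ((PySem.List.pyRange (i + 1) (b.length : Int) 1).map
          (fun j => pvPair (PySem.List.pyGetD b i 0) (PySem.List.pyGetD b j 0) i j)).sum := by
    intro i acc
    rw [show (fun attacks j =>
        let attacks := if PySem.List.pyGetD b i 0 = PySem.List.pyGetD b j 0
                       then attacks + 1 else attacks
        if (PySem.List.pyGetD b i 0 - PySem.List.pyGetD b j 0).natAbs = (i - j).natAbs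
        then attacks + 1 else attacks)
      = (fun (attacks j : Int) => attacks + pvPair (PySem.List.pyGetD b i 0) (PySem.List.pyGetD b j 0) i j)
      from funext fun a => funext fun j => pvStep_eq a _ _ _ _]
    exact PySem.List.foldl_add _ _ _
  unfold count_attacks
  simp only []
  rw [show (fun (attacks i : Int) =>
      (PySem.List.pyRange (i + 1) (b.length : Int) 1).foldl (fun attacks j =>
        let attacks := if PySem.List.pyGetD b i 0 = PySem.List.pyGetD b j 0
                       then attacks + 1 else attacks
        if (PySem.List.pyGetD b i 0 - PySem.List.pyGetD b j 0).natAbs = (i - j).natAbs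
        then attacks + 1 else attacks) attacks)
    = (fun (attacks i : Int) => attacks + ((PySem.List.pyRange (i + 1) (b.length : Int) 1).map
          (fun j => pvPair (PySem.List.pyGetD b i 0) (PySem.List.pyGetD b j 0) i j)).sum)
    from funext fun a => funext fun i => hin i a]
  rw [PySem.List.foldl_add, pyRange_map_sum]
  simp only [zero_add, sub_zero, Int.toNat_natCast]
  unfold pvS
  refine Finset.sum_congr rfl ?_
  intro k hk
  rw [pyRange_map_sum]
  have h1 : ((b.length : Int) - ((k : Int) + 1)).toNat = b.length - (k + 1) := by omega
  rw [h1, Finset.sum_Ico_eq_sum_range]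
  refine Finset.sum_congr rfl ?_
  intro m _
  have h2 : ((k : Int) + 1 + (m : Int)) = ((k + 1 + m : ℕ) : Int) := by push_cast; ring
  simp only [pvT, pvVal, pvPair]
  rw [h2]
  simp only [PySem.List.pyGetD_natCast, List.getD_eq_getElem?_getD]

theorem pvStepC_eq (c x v j r : Int) :
    (if j = r then c
     else
       if (x - v).natAbs = (j - r).natAbs
       then (if x = v then c + 1 else c) + 1 else (if x = v then c + 1 else c))
    = c + (if j = r then 0 else pvPair x v j r) := by
  unfold pvPair; split_ifs <;> omega

-- bridge: B's pvContrib equals pvC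
theorem pvContrib_eq (b : List Int) (r : ℕ) (v : Int) :
    pvContrib b (r : Int) v = pvC b r v := by
  unfold pvContrib
  rw [show (fun (c j : Int) =>
      if j = (r : Int) then c
      else
        let c := if PySem.List.pyGetD b j 0 = v then c + 1 else c
        if (PySem.List.pyGetD b j 0 - v).natAbs = (j - (r : Int)).natAbs then c + 1 else c)
    = (fun (c j : Int) => c + (if j = (r : Int) then 0 else pvPair (PySem.List.pyGetD b j 0) v j (r : Int)))
    from funext fun c => funext fun j => pvStepC_eq c _ v j (r : Int)]
  rw [PySem.List.foldl_add, pyRange_map_sum]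
  simp only [zero_add, sub_zero, Int.toNat_natCast]
  unfold pvC
  refine Finset.sum_congr rfl ?_
  intro k _
  simp only [PySem.List.pyGetD_natCast, Nat.cast_inj, List.getD_eq_getElem?_getD, pvVal]

-- pvC viewed as lower + upper parts
theorem pvC_split (b : List Int) (r : ℕ) (hr : r < b.length) (v : Int) :
    pvC b r v
      = (∑ i ∈ Finset.range r, pvPair (pvVal b i) v i r)
        + ∑ j ∈ Finset.Ico (r + 1) b.length, pvPair v (pvVal b j) r j := by
  unfold pvC
  rw [sum_range_split r b.length hr (fun j => if j = r then 0 else pvPair (pvVal b j) v j r)]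
  have h0 : (if r = r then (0 : Int) else pvPair (pvVal b r) v r r) = 0 := by simp
  rw [h0, add_zero]
  congr 1
  · refine Finset.sum_congr rfl fun i hi => ?_
    have : i ≠ r := by have := Finset.mem_range.mp hi; omega
    rw [if_neg this]
  · refine Finset.sum_congr rfl fun j hj => ?_
    have hjr : j ≠ r := by have := (Finset.mem_Ico.mp hj).1; omega
    rw [if_neg hjr, pvPair_comm]

-- pieces of pvS relative to a fixed row r: pairs below r, above r, and avoiding r
def pvL (b : List Int) (r : ℕ) (v : Int) : Int :=
  ∑ i ∈ Finset.range r, pvPair (pvVal b i) v i r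

def pvU (b : List Int) (n r : ℕ) (v : Int) : Int :=
  ∑ j ∈ Finset.Ico (r + 1) n, pvPair v (pvVal b j) r j

def pvE (b : List Int) (n r : ℕ) : Int :=
  (∑ i ∈ Finset.range r,
      (∑ j ∈ Finset.Ico (i + 1) r, pvT b i j + ∑ j ∈ Finset.Ico (r + 1) n, pvT b i j))
    + ∑ i ∈ Finset.Ico (r + 1) n, ∑ j ∈ Finset.Ico (i + 1) n, pvT b i j

theorem pvS_decomp (b : List Int) (r : ℕ) (hr : r < b.length) :
    pvS b = pvE b b.length r + pvL b r (pvVal b r) + pvU b b.length r (pvVal b r) := by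
  unfold pvS pvE pvL pvU
  rw [sum_range_split r b.length hr (fun i => ∑ j ∈ Finset.Ico (i + 1) b.length, pvT b i j)]
  have hsplit : ∀ i ∈ Finset.range r,
      ∑ j ∈ Finset.Ico (i + 1) b.length, pvT b i j
        = (∑ j ∈ Finset.Ico (i + 1) r, pvT b i j
            + ∑ j ∈ Finset.Ico (r + 1) b.length, pvT b i j) + pvT b i r := by
    intro i hi
    have hi' := Finset.mem_range.mp hi
    rw [sum_Ico_split (i + 1) r b.length (by omega) hr (fun j => pvT b i j)]
    ring
  rw [Finset.sum_congr rfl hsplit, Finset.sum_add_distrib]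
  unfold pvT
  ring

theorem pvC_eq_L_add_U (b : List Int) (r : ℕ) (hr : r < b.length) (v : Int) :
    pvC b r v = pvL b r v + pvU b b.length r v :=
  pvC_split b r hr v

-- delta: moving the queen in row r to column c changes the count by the contrib delta
theorem pvS_set (b : List Int) (r : ℕ) (c : Int) (hr : r < b.length) :
    pvS (b.set r c) = pvS b - pvC b r (pvVal b r) + pvC b r c := by
  have hlen : (b.set r c).length = b.length := List.length_set
  have hv : ∀ k, k ≠ r → pvVal (b.set r c) k = pvVal b k := by
    intro k hk
    unfold pvVal
    rw [List.getD_eq_getElem?_getD, List.getD_eq_getElem?_getD,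
        List.getElem?_set_ne (by omega)]
  have hvr : pvVal (b.set r c) r = c := by
    unfold pvVal
    rw [List.getD_eq_getElem?_getD, List.getElem?_set_self hr]
    rfl
  have h1 := pvS_decomp (b.set r c) r (by omega)
  rw [hlen] at h1
  have hE : pvE (b.set r c) b.length r = pvE b b.length r := by
    unfold pvE pvT
    congr 1
    · refine Finset.sum_congr rfl fun i hi => ?_
      have hi' := Finset.mem_range.mp hi
      congr 1
      · refine Finset.sum_congr rfl fun j hj => ?_
        have hj' := Finset.mem_Ico.mp hj
        rw [hv i (by omega), hv j (by omega)]
      · refine Finset.sum_congr rfl fun j hj => ?_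
        have hj' := Finset.mem_Ico.mp hj
        rw [hv i (by omega), hv j (by omega)]
    · refine Finset.sum_congr rfl fun i hi => ?_
      have hi' := Finset.mem_Ico.mp hi
      refine Finset.sum_congr rfl fun j hj => ?_
      have hj' := Finset.mem_Ico.mp hj
      rw [hv i (by omega), hv j (by omega)]
  have hL : ∀ v, pvL (b.set r c) r v = pvL b r v := by
    intro v
    unfold pvL
    refine Finset.sum_congr rfl fun i hi => ?_
    have hi' := Finset.mem_range.mp hi
    rw [hv i (by omega)]
  have hU : ∀ v, pvU (b.set r c) b.length r v = pvU b b.length r v := by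
    intro v
    unfold pvU
    refine Finset.sum_congr rfl fun j hj => ?_
    have hj' := Finset.mem_Ico.mp hj
    rw [hv j (by omega)]
  rw [h1, hvr, hE, hL, hU, pvS_decomp b r hr,
      pvC_eq_L_add_U b r hr (pvVal b r), pvC_eq_L_add_U b r hr c]
  ring

-- handshake: summing per-row contributions counts every pair twice
theorem pv_handshake (b : List Int) :
    ∑ r ∈ Finset.range b.length, pvC b r (pvVal b r) = 2 * pvS b := by
  have hsplit : ∀ r ∈ Finset.range b.length,
      pvC b r (pvVal b r) = pvL b r (pvVal b r) + pvU b b.length r (pvVal b r) := by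
    intro r hr
    exact pvC_eq_L_add_U b r (Finset.mem_range.mp hr) (pvVal b r)
  rw [Finset.sum_congr rfl hsplit, Finset.sum_add_distrib]
  have hU : ∑ r ∈ Finset.range b.length, pvU b b.length r (pvVal b r) = pvS b := by
    unfold pvU pvS pvT
    rfl
  have hL : ∑ r ∈ Finset.range b.length, pvL b r (pvVal b r) = pvS b := by
    unfold pvL
    rw [sum_triangle b.length (fun i r => pvPair (pvVal b i) (pvVal b r) i r)]
    unfold pvS pvT
    rfl
  rw [hU, hL]
  ring

-- B's base (sum of per-row contributions, floor-halved) is A's full count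
theorem pv_base_eq (b : List Int) :
    PySem.Int.floordiv
      ((PySem.List.pyRange 0 (b.length : Int) 1).foldl
        (fun t r => t + pvContrib b r (PySem.List.pyGetD b r 0)) 0) 2
    = count_attacks b := by
  rw [PySem.List.foldl_add, pyRange_map_sum]
  simp only [zero_add, sub_zero, Int.toNat_natCast]
  have hc : ∀ k ∈ Finset.range b.length,
      pvContrib b (k : Int) (PySem.List.pyGetD b (k : Int) 0) = pvC b k (pvVal b k) := by
    intro k _
    rw [pvContrib_eq]
    congr 1
    simp only [PySem.List.pyGetD_natCast, pvVal]
  rw [Finset.sum_congr rfl hc, pv_handshake, count_attacks_eq]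
  rw [PySem.Int.floordiv_eq_ediv_of_pos (by norm_num)]
  exact Int.mul_ediv_cancel_left _ (by norm_num)

-- each candidate move is scored identically by the two programs
theorem pv_attacks_eq (b : List Int) (row col : Int) (hrow : row ∈ PySem.List.pyRange 0 (b.length : Int) 1) :
    count_attacks (PySem.List.pySetD b row col)
      = count_attacks b - pvContrib b row (PySem.List.pyGetD b row 0) + pvContrib b row col := by
  have hb := (PySem.List.mem_pyRange_one).mp hrow
  obtain ⟨k, hk, rfl⟩ : ∃ k : ℕ, k < b.length ∧ ((k : Int) = row) := by
    refine ⟨row.toNat, by omega, by omega⟩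
  rw [PySem.List.pySetD_natCast, count_attacks_eq, count_attacks_eq,
      pvS_set b k col hk, pvContrib_eq, pvContrib_eq]
  congr 2
  simp only [PySem.List.pyGetD_natCast, pvVal]

theorem get_best_neighbour_eq (board : List Int) :
    get_best_neighbour board = get_best_neighbour_alt board := by
  unfold get_best_neighbour get_best_neighbour_alt
  simp only []
  rw [pv_base_eq board]
  apply PySem.List.foldl_congr_mem
  intro s row hrow
  apply PySem.List.foldl_congr_mem
  intro t col _
  by_cases hskip : col = PySem.List.pyGetD board row 0
  · simp only [if_pos hskip]
  · simp only [if_neg hskip]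
    rw [pv_attacks_eq board row col hrow]

-- ===== VERDICT (by name: the statement is the Claim_ definition above) =====
theorem get_best_neighbour_spec : Claim_equal_get_best_neighbour := by
  intro board _
  unfold Spec_get_best_neighbour
  exact get_best_neighbour_eq board
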